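-- pv_equiv track=rewrite | github.com/daniel-reich/ubiquitous-fiesta | GPodAAMFqz9sLWmAy_19.py | one_odd_one_even
-- ===== SOURCE A (Python) =====
-- def one_odd_one_even(n):
--   nums = list(map(int, str(n)))
--   counter = [0,0]
--   for n in nums:
--     if n % 2 == 0:
--       counter[0] = 1
--     elif n % 2 != 0:
--       counter[1]= 1
--   return counter == [1,1]
-- ===== SOURCE B (Python) =====
-- def one_odd_one_even(n):
--   def has_parity(m, p):
--     if m % 10 % 2 == p:
--       return True
--     if m < 10:
--       return False
--     return has_parity(m // 10, p)
--   return has_parity(n, 0) and has_parity(n, 1)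
-- ===== Notes on version B (the rewrite author's own statement) =====
-- stated objective: alternative
-- what changed: Drops the str(n) conversion and the single flag-accumulating pass entirely: B extracts digits arithmetically (m % 10, m // 10) with a recursive helper and makes two short-circuiting searches, one for an even digit and one for an odd digit.
import Mathlib
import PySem

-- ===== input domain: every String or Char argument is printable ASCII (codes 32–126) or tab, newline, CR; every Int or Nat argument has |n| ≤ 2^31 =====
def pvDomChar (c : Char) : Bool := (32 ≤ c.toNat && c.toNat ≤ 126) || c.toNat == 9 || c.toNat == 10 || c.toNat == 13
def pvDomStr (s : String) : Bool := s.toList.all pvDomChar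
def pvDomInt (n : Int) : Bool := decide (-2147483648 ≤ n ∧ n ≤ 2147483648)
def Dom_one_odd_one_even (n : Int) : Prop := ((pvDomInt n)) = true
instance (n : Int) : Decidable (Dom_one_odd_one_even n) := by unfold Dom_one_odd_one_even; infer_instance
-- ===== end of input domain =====

-- B replaces A's str(n)-based single pass with two flags by a purely arithmetic recursive digit search (m % 10 / m // 10), run twice with early exit: once for an even digit, once for an odd one (alternative decomposition; same cost; agreement proved for 0 ≤ n, negatives excluded because int('-') makes A raise ValueError).


-- ===== PORT A =====
-- int(c) on one decimal digit is ported by hand as code − 48 (exact for digit characters;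
-- Pre_ excludes negative n, whose '-' makes Python's int() raise ValueError).
def one_odd_one_even (n : Int) : Bool :=
  let nums : List Int := (PySem.Int.toChars n).map (fun c => (c.toNat : Int) - 48)
  let counter : Int × Int := nums.foldl (fun c m =>
    if PySem.Int.mod m 2 = 0 then (1, c.2)
    else if ¬ (PySem.Int.mod m 2 = 0) then (c.1, 1)
    else c) (0, 0)
  counter == (1, 1)

-- ===== PORT B =====
-- Source B's inner helper has_parity(m, p): recursive arithmetic digit search with early exit.
def pvHasParity (m p : Int) : Bool :=
  if PySem.Int.mod (PySem.Int.mod m 10) 2 = p then true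
  else if m < 10 then false
  else pvHasParity (PySem.Int.floordiv m 10) p
termination_by m.toNat
decreasing_by
  rw [PySem.Int.floordiv_eq_ediv_of_pos (by norm_num)]
  omega

def one_odd_one_even_alt (n : Int) : Bool :=
  pvHasParity n 0 && pvHasParity n 1

-- ===== PRECONDITION & SPEC =====
-- Pre_ excludes negative n: there str(n) starts with '-', and int('-') raises ValueError in A.
def Pre_one_odd_one_even (n : Int) : Prop := 0 ≤ n
instance (n : Int) : Decidable (Pre_one_odd_one_even n) := by unfold Pre_one_odd_one_even; infer_instance
def pvWitness_one_odd_one_even : Int := (38)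

def Spec_one_odd_one_even (n : Int) (out : Bool) : Prop := out = one_odd_one_even_alt n
instance (n : Int) (out : Bool) : Decidable (Spec_one_odd_one_even n out) := by unfold Spec_one_odd_one_even; infer_instance

-- ===== CLAIM (what is proved, stated in full; the proofs are below) =====
def Claim_equal_one_odd_one_even : Prop := ∀ (n : Int), Dom_one_odd_one_even n → Pre_one_odd_one_even n → Spec_one_odd_one_even n (one_odd_one_even n)

-- ===== LEMMAS AND PROOFS =====

-- The big-endian digit list of n ≥ 0 as Ints (what A's `list(map(int, str(n)))` denotes).
def pvDigitsBE (n : Int) : List Int :=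
  if n.toNat = 0 then [0] else ((Nat.digits 10 n.toNat).map Int.ofNat).reverse

theorem mod2_eq (m : Int) : PySem.Int.mod m 2 = m % 2 := PySem.Int.mod_eq_emod_of_pos (by norm_num)

theorem mod10_eq (m : Int) : PySem.Int.mod m 10 = m % 10 := PySem.Int.mod_eq_emod_of_pos (by norm_num)

-- Core's fuelled printer agrees with Mathlib's digit list (reversed) when the fuel suffices.
theorem toDigitsCore_eq (f : Nat) : ∀ (m : Nat) (ds : List Char), 0 < m → m < f →
    Nat.toDigitsCore 10 f m ds = ((Nat.digits 10 m).map Nat.digitChar).reverse ++ ds := by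
  induction f with
  | zero => intro m ds hm hf; omega
  | succ f ih =>
    intro m ds hm hf
    rw [Nat.toDigitsCore]
    rw [Nat.digits_def' (by norm_num : 1 < 10) hm]
    by_cases h0 : m / 10 = 0
    · simp [h0]
    · rw [if_neg h0, ih (m / 10) _ (Nat.pos_of_ne_zero h0)
        (by have := Nat.div_lt_self hm (by norm_num : 1 < 10); omega)]
      simp

theorem digitChar_sub48 (d : Nat) (h : d < 10) :
    ((Nat.digitChar d).toNat : Int) - 48 = (d : Int) := by
  interval_cases d <;> decide

theorem toChars_nonneg (n : Int) (h : 0 ≤ n) :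
    (PySem.Int.toChars n).map (fun c => (c.toNat : Int) - 48) = pvDigitsBE n := by
  unfold PySem.Int.toChars pvDigitsBE
  rw [if_neg (by omega)]
  by_cases h0 : n.toNat = 0
  · rw [h0]; decide
  · rw [if_neg h0]
    unfold Nat.toDigits
    rw [toDigitsCore_eq (n.toNat + 1) n.toNat [] (Nat.pos_of_ne_zero h0) (by omega)]
    rw [List.append_nil, List.map_reverse, List.map_map]
    congr 1
    apply List.map_congr_left
    intro d hd
    simpa using digitChar_sub48 d (Nat.digits_lt_base (by norm_num) hd)

-- B's recursive search finds exactly the digits of parity p (for n ≥ 0 and p the result of a % 2).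
theorem hasParity_iff (n : Int) (h : 0 ≤ n) (p : Int) :
    pvHasParity n p = true ↔ ∃ d ∈ pvDigitsBE n, d % 2 = p := by
  induction hk : n.toNat using Nat.strong_induction_on generalizing n with
  | _ k ih =>
  rw [pvHasParity, mod10_eq, mod2_eq]
  by_cases hsmall : n < 10
  · have hdig : pvDigitsBE n = [n] := by
      unfold pvDigitsBE
      by_cases h0 : n.toNat = 0
      · rw [if_pos h0]; congr 1; omega
      · rw [if_neg h0, Nat.digits_def' (by norm_num : 1 < 10) (Nat.pos_of_ne_zero h0),
          Nat.div_eq_of_lt (by omega), Nat.digits_zero]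
        simp; omega
    have hn10 : n % 10 = n := Int.emod_eq_of_lt h hsmall
    rw [hdig, hn10]
    by_cases hp : n % 2 = p <;> simp [hp, hsmall]
  · have h10 : (10 : Int) ≤ n := by omega
    have hfd : PySem.Int.floordiv n 10 = n / 10 :=
      PySem.Int.floordiv_eq_ediv_of_pos (by norm_num)
    have hq0 : 0 ≤ n / 10 := Int.ediv_nonneg h (by norm_num)
    have hql : (n / 10).toNat < k := by omega
    have hdig : pvDigitsBE n = pvDigitsBE (n / 10) ++ [n % 10] := by
      unfold pvDigitsBE
      have hk0 : n.toNat ≠ 0 := by omega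
      have hq : (n / 10).toNat = n.toNat / 10 := by omega
      have hqne : n.toNat / 10 ≠ 0 := by
        have : 10 ≤ n.toNat := by omega
        omega
      rw [if_neg hk0, if_neg (by rw [hq]; exact hqne),
        Nat.digits_def' (by norm_num : 1 < 10) (by omega)]
      simp only [List.map_cons, List.reverse_cons, hq]
      congr 1
      have : n % 10 = ((n.toNat % 10 : Nat) : Int) := by omega
      rw [this]
      simp [Int.ofNat_eq_natCast]
    rw [hdig]
    have hrec := ih (n / 10).toNat hql (n / 10) hq0 rfl
    by_cases hp : n % 10 % 2 = p
    · simp only [if_pos hp, if_neg hsmall]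
      constructor
      · intro _; exact ⟨n % 10, by simp, hp⟩
      · intro _; trivial
    · simp only [if_neg hp, if_neg hsmall, hfd, hrec]
      constructor
      · rintro ⟨d, hd, hdp⟩; exact ⟨d, by simp [hd], hdp⟩
      · rintro ⟨d, hd, hdp⟩
        rcases List.mem_append.mp hd with h' | h'
        · exact ⟨d, h', hdp⟩
        · simp at h'; subst h'; exact absurd hdp hp

-- A's loop invariant: after the fold, the first flag became 1 iff an even element occurred, the second iff an odd one did.
theorem foldA_char (xs : List Int) (c : Int × Int) :
    xs.foldl (fun c m =>
      if PySem.Int.mod m 2 = 0 then ((1 : Int), c.2)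
      else if ¬ (PySem.Int.mod m 2 = 0) then (c.1, (1 : Int)) else c) c
    = ((if ∃ m ∈ xs, m % 2 = 0 then 1 else c.1),
       (if ∃ m ∈ xs, m % 2 = 1 then 1 else c.2)) := by
  induction xs generalizing c with
  | nil => simp
  | cons x xs ih =>
    rw [List.foldl_cons, ih]
    rcases Int.emod_two_eq x with h | h
    · simp [h]
    · have h2 : ¬ (2:ℤ) ∣ x := by omega
      simp [h, h2]

theorem ports_eq (n : Int) (h : 0 ≤ n) : one_odd_one_even n = one_odd_one_even_alt n := by
  unfold one_odd_one_even one_odd_one_even_alt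
  simp only [toChars_nonneg n h, foldA_char]
  rw [Bool.eq_iff_iff]
  simp only [beq_iff_eq, Prod.mk.injEq, Bool.and_eq_true, hasParity_iff n h]
  by_cases h0 : ∃ d ∈ pvDigitsBE n, d % 2 = 0 <;>
    by_cases h1 : ∃ d ∈ pvDigitsBE n, d % 2 = 1 <;>
      simp [h1]

-- ===== VERDICT (by name: the statement is the Claim_ definition above) =====
theorem one_odd_one_even_spec : Claim_equal_one_odd_one_even := by
  intro n _ hpre
  unfold Spec_one_odd_one_even
  exact ports_eq n hpre
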